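-- pv_equiv track=rewrite | github.com/yash252525/HackathonHealthTech | DataFetch.py | filter_papers
-- ===== SOURCE A (Python) =====
-- def filter_papers(papers, required_terms):
--     """
--     Post-filter papers to include those having at least one of the required terms
--     in either the title or abstract.
--     """
--     filtered = []
--     for paper in papers:
--         title = paper.get('title', '').lower()
--         abstract = paper.get('abstract', '').lower()
--         if any(term.lower() in title for term in required_terms) or any(
--                 term.lower() in abstract for term in required_terms):
--             filtered.append(paper)
--     return filtered
-- ===== SOURCE B (Python) =====
-- def filter_papers(papers, required_terms):
--     # Term-major strategy: for each required term collect the set of indices of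
--     # matching papers, then reassemble the kept papers in their original order.
--     # Correct because a paper is kept iff SOME term hits it, and the final pass
--     # over enumerate(papers) restores the original order regardless of which
--     # term (or how many) recorded the index.
--     hits = set()
--     for term in required_terms:
--         t = term.lower()
--         for i, paper in enumerate(papers):
--             if t in paper.get('title', '').lower() or t in paper.get('abstract', '').lower():
--                 hits.add(i)
--     return [paper for i, paper in enumerate(papers) if i in hits]
-- ===== Notes on version B (the rewrite author's own statement) =====
-- stated objective: alternative
-- what changed: B inverts the loop nesting: instead of A's paper-major pass testing every term against each paper and appending, B iterates term-major, accumulating a set of matching paper indices per term, and then rebuilds the kept papers from that index set in a final enumerate pass.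
import Mathlib
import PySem

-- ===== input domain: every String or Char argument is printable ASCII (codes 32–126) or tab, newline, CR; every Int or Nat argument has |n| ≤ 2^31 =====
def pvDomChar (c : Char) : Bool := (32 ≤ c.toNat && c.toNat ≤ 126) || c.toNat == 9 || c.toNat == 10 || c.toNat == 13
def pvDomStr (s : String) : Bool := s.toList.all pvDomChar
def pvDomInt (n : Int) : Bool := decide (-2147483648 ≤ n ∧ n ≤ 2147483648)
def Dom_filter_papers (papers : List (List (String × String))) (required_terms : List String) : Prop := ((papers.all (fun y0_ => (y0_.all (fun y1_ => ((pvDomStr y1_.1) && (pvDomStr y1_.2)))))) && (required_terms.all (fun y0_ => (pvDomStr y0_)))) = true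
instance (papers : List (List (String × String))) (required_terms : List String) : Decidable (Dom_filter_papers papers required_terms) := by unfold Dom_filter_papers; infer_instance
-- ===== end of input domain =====

-- B inverts A's loop nesting: term-major accumulation of a set of matching paper indices, then a final enumerate pass rebuilds the kept papers in order (alternative algorithm, same cost).


-- ===== PORT A =====
-- Literal port of A: paper-major append-loop, two separate any() scans over the terms.
def filter_papers (papers : List (List (String × String))) (required_terms : List String) : List (List (String × String)) :=
  papers.foldl (fun filtered paper =>
    let title := PySem.Str.lower (PySem.Dict.getD (PySem.Dict.mk paper) "title" "")
    let abstract := PySem.Str.lower (PySem.Dict.getD (PySem.Dict.mk paper) "abstract" "")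
    if (required_terms.any (fun term => PySem.Str.isIn (PySem.Str.lower term) title)
        || required_terms.any (fun term => PySem.Str.isIn (PySem.Str.lower term) abstract))
    then filtered ++ [paper] else filtered) []

-- ===== PORT B =====
-- Port of B: term-major loops building the set 'hits' of matching paper indices,
-- then a comprehension over enumerate(papers) keeping papers whose index is in 'hits'.
def filter_papers_alt (papers : List (List (String × String))) (required_terms : List String) : List (List (String × String)) :=
  let hits : PySem.Set Int := required_terms.foldl (fun hits term =>
    let t := PySem.Str.lower term
    (PySem.List.enumerate papers).foldl (fun hits ip =>
      if PySem.Str.isIn t (PySem.Str.lower (PySem.Dict.getD (PySem.Dict.mk ip.2) "title" ""))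
          || PySem.Str.isIn t (PySem.Str.lower (PySem.Dict.getD (PySem.Dict.mk ip.2) "abstract" ""))
      then PySem.Set.add hits ip.1 else hits) hits) PySem.Set.empty
  ((PySem.List.enumerate papers).filter (fun ip => PySem.Set.contains hits ip.1)).map (fun ip => ip.2)

-- ===== PRECONDITION & SPEC =====
def Spec_filter_papers (papers : List (List (String × String))) (required_terms : List String) (out : List (List (String × String))) : Prop := out = filter_papers_alt papers required_terms
instance (papers : List (List (String × String))) (required_terms : List String) (out : List (List (String × String))) : Decidable (Spec_filter_papers papers required_terms out) := by unfold Spec_filter_papers; infer_instance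

-- ===== CLAIM =====
def Claim_equal_filter_papers : Prop := ∀ (papers : List (List (String × String))) (required_terms : List String), Dom_filter_papers papers required_terms → Spec_filter_papers papers required_terms (filter_papers papers required_terms)

-- ===== LEMMAS AND PROOFS =====

-- The per-paper match test shared by the analyses of both ports.
def pvMatch (term : String) (paper : List (String × String)) : Bool :=
  PySem.Str.isIn (PySem.Str.lower term) (PySem.Str.lower (PySem.Dict.getD (PySem.Dict.mk paper) "title" ""))
    || PySem.Str.isIn (PySem.Str.lower term) (PySem.Str.lower (PySem.Dict.getD (PySem.Dict.mk paper) "abstract" ""))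

theorem any_or_split {α : Type} (l : List α) (p q : α → Bool) :
    (l.any p || l.any q) = l.any (fun x => p x || q x) := by
  induction l with
  | nil => rfl
  | cons a t ih =>
    simp only [List.any_cons, ← ih]
    cases p a <;> cases q a <;> cases t.any p <;> cases t.any q <;> rfl

-- Membership in the inner fold: an index is in the result iff it was in the
-- start set or some enumerated pair with that index satisfies the test.
theorem mem_inner_fold {P : Type} (f : P → Bool) (l : List (Int × P)) (s : PySem.Set Int) (i : Int) :
    i ∈ l.foldl (fun s ip => if f ip.2 then PySem.Set.add s ip.1 else s) s ↔
      i ∈ s ∨ ∃ ip, ip ∈ l ∧ ip.1 = i ∧ f ip.2 = true := by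
  induction l generalizing s with
  | nil => simp
  | cons a t ih =>
    rw [List.foldl_cons, ih]
    by_cases h : f a.2 = true
    · rw [if_pos h]
      constructor
      · rintro (hs | ⟨ip, h2, h3, h4⟩)
        · rcases (PySem.Set.mem_add s a.1 i).mp hs with h1 | h1
          · exact Or.inl h1
          · exact Or.inr ⟨a, List.mem_cons_self, h1.symm, h⟩
        · exact Or.inr ⟨ip, List.mem_cons_of_mem a h2, h3, h4⟩
      · rintro (hs | ⟨ip, h2, h3, h4⟩)
        · exact Or.inl ((PySem.Set.mem_add s a.1 i).mpr (Or.inl hs))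
        · rcases List.mem_cons.mp h2 with heq | h2
          · exact Or.inl ((PySem.Set.mem_add s a.1 i).mpr (Or.inr (heq ▸ h3).symm))
          · exact Or.inr ⟨ip, h2, h3, h4⟩
    · rw [if_neg h]
      constructor
      · rintro (hs | ⟨ip, h2, h3, h4⟩)
        · exact Or.inl hs
        · exact Or.inr ⟨ip, List.mem_cons_of_mem a h2, h3, h4⟩
      · rintro (hs | ⟨ip, h2, h3, h4⟩)
        · exact Or.inl hs
        · rcases List.mem_cons.mp h2 with rfl | h2
          · exact absurd h4 h
          · exact Or.inr ⟨ip, h2, h3, h4⟩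

-- Membership in the outer fold over the terms.
theorem mem_outer_fold (papers : List (List (String × String))) (terms : List String)
    (s : PySem.Set Int) (i : Int) :
    i ∈ terms.foldl (fun s term =>
        (PySem.List.enumerate papers).foldl (fun s ip =>
          if pvMatch term ip.2 then PySem.Set.add s ip.1 else s) s) s ↔
      i ∈ s ∨ ∃ term, term ∈ terms ∧ ∃ ip, ip ∈ PySem.List.enumerate papers ∧ ip.1 = i ∧ pvMatch term ip.2 = true := by
  induction terms generalizing s with
  | nil => simp
  | cons a t ih =>
    rw [List.foldl_cons, ih]
    constructor
    · rintro (hin | ⟨term, h2, h3⟩)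
      · rcases (mem_inner_fold (pvMatch a) (PySem.List.enumerate papers) s i).mp hin with h1 | ⟨ip, h2, h3, h4⟩
        · exact Or.inl h1
        · exact Or.inr ⟨a, List.mem_cons_self, ip, h2, h3, h4⟩
      · exact Or.inr ⟨term, List.mem_cons_of_mem a h2, h3⟩
    · rintro (hin | ⟨term, h2, h3⟩)
      · exact Or.inl ((mem_inner_fold (pvMatch a) (PySem.List.enumerate papers) s i).mpr (Or.inl hin))
      · rcases List.mem_cons.mp h2 with rfl | h2
        · exact Or.inl ((mem_inner_fold (pvMatch term) (PySem.List.enumerate papers) s i).mpr (Or.inr h3))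
        · exact Or.inr ⟨term, h2, h3⟩

-- Distinct indices in enumerate: a pair carrying the index of ip IS ip.
theorem enumerate_fst_inj {P : Type} (xs : List P) (ip jp : Int × P)
    (hip : ip ∈ PySem.List.enumerate xs) (hjp : jp ∈ PySem.List.enumerate xs)
    (h : jp.1 = ip.1) : jp = ip := by
  rw [PySem.List.mem_enumerate_iff] at hip hjp
  obtain ⟨k, hk, rfl⟩ := hip
  obtain ⟨m, hm, rfl⟩ := hjp
  simp only [zero_add] at h ⊢
  have : m = k := by exact_mod_cast h
  subst this; rfl

-- Dropping the index: filtering enumerate by a test of the element and projecting.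
theorem filter_enumerate_map_snd {P : Type} (g : P → Bool) (xs : List P) (s : Int) :
    ((PySem.List.enumerate xs s).filter (fun ip => g ip.2)).map (fun ip => ip.2) = xs.filter g := by
  induction xs generalizing s with
  | nil => rfl
  | cons a t ih =>
    rw [PySem.List.enumerate_cons]
    by_cases h : g a = true
    · simp [h, ih]
    · simp [h, ih]

-- ===== VERDICT =====
theorem alt_eq_filter (papers : List (List (String × String))) (terms : List String) :
    filter_papers_alt papers terms =
      papers.filter (fun paper => terms.any (fun term => pvMatch term paper)) := by
  simp only [filter_papers_alt]
  rw [List.filter_congr (q := fun ip : Int × List (String × String) =>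
        terms.any (fun term => pvMatch term ip.2))
      (by
        intro ip hip
        rw [Bool.eq_iff_iff, PySem.Set.contains_iff, List.any_eq_true]
        constructor
        · intro h
          rcases (mem_outer_fold papers terms PySem.Set.empty ip.1).mp h with
            h | ⟨term, h2, jp, h3, h4, h5⟩
          · exact absurd h (by simp [PySem.Set.empty])
          · have hj : jp = ip := enumerate_fst_inj papers ip jp hip h3 h4
            exact ⟨term, h2, hj ▸ h5⟩
        · rintro ⟨term, h2, h3⟩
          exact (mem_outer_fold papers terms PySem.Set.empty ip.1).mpr
            (Or.inr ⟨term, h2, ip, hip, rfl, h3⟩))]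
  exact filter_enumerate_map_snd (fun paper => terms.any (fun term => pvMatch term paper)) papers 0

theorem filter_papers_spec : Claim_equal_filter_papers := by
  intro papers required_terms _
  unfold Spec_filter_papers
  rw [alt_eq_filter]
  unfold filter_papers
  rw [PySem.List.foldl_append_ite_eq_filter]
  simp only [List.nil_append, any_or_split]
  apply List.filter_congr
  intro paper _
  rw [Bool.eq_iff_iff]
  simp [pvMatch, List.any_eq_true]
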